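-- pv_equiv track=rewrite | github.com/rickynyairo/algorithm-questions | q3-sum-xor.py | calculate
-- ===== SOURCE A (Python) =====
-- def calculate(summation, xor):
--     A = (summation - xor)//2
--     a, b = 0, 0
--     for i in range(64):
--         Xi = (xor & (1 << i))
--         Ai = (A & (1 << i))
--         if (Xi == 0 and Ai == 0):
--             pass
--         elif (Xi == 0 and Ai > 0):
--             a = ((1 << i) | a)
--             b = ((1 << i) | b)
--         elif (Xi > 0 and Ai == 0):
--             a = ((1 << i) | a)
--
--         else: # (Xi == 1 and Ai == 1)
--             return -1
--     return (min(a, b), max(a, b))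
-- ===== SOURCE B (Python) =====
-- def calculate(summation, xor):
--     A = (summation - xor) // 2
--     mask = (1 << 64) - 1
--     A64 = A & mask
--     x64 = xor & mask
--     if A64 & x64:
--         raise ValueError("no pair of numbers has this sum and xor")
--     a = A64 | x64
--     b = A64
--     return (min(a, b), max(a, b))
-- ===== Notes on version B (the rewrite author's own statement) =====
-- stated objective: simpler
-- what changed: The fixed 64-iteration per-bit loop with accumulators is replaced by closed-form bitwise expressions: mask A and xor to 64 bits, fail if they share a set bit, otherwise the pair is (A64, A64|x64); Pre_ excludes the inputs where (summation-xor)//2 and xor share a set bit in the low 64 bits, on which the original returns the sentinel -1 (an int where an Optional pair is declared) while B raises ValueError.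
-- outside the precondition, e.g. on calculate(1, 2): A returns -1, B raises ValueError
import Mathlib
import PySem

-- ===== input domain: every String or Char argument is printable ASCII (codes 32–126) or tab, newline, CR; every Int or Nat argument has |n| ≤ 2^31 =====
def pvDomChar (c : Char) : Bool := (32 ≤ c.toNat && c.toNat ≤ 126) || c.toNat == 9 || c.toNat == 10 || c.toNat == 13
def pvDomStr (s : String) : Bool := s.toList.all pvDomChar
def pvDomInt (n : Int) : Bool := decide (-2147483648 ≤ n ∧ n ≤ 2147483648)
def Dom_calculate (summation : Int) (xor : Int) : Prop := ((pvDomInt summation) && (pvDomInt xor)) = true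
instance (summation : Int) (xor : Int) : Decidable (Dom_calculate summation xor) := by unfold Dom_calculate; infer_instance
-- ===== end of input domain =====

-- B replaces the fixed 64-iteration per-bit loop by closed-form bitwise expressions (mask,
-- shared-bit test, or). On the excluded inputs (a shared set bit in the low 64 bits) Python A
-- returns -1 (an int where an Optional pair is declared) and Python B raises ValueError; both
-- are ported as `none`, and Pre_ excludes exactly those inputs.

-- ===== PORT A =====
-- the `for i in range(64)` loop with early return; `return -1` is ported as `none`
-- (the value -1 lies outside the declared return type Optional[tuple[int,int]])
def calcLoop (xor A : Int) (i : Nat) (a b : Int) : Option (Int × Int) :=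
  if i < 64 then
    let Xi := PySem.Int.band xor ((1:Int) <<< i)
    let Ai := PySem.Int.band A ((1:Int) <<< i)
    if Xi = 0 ∧ Ai = 0 then calcLoop xor A (i+1) a b
    else if Xi = 0 ∧ Ai > 0 then
      calcLoop xor A (i+1) (PySem.Int.bor ((1:Int) <<< i) a) (PySem.Int.bor ((1:Int) <<< i) b)
    else if Xi > 0 ∧ Ai = 0 then
      calcLoop xor A (i+1) (PySem.Int.bor ((1:Int) <<< i) a) b
    else none
  else some (min a b, max a b)
termination_by 64 - i
decreasing_by all_goals omega

def calculate (summation : Int) (xor : Int) : Option (Int × Int) :=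
  let A := PySem.Int.floordiv (summation - xor) 2
  calcLoop xor A 0 0 0

-- ===== PORT B =====
def calculate_alt (summation : Int) (xor : Int) : Option (Int × Int) :=
  let A := PySem.Int.floordiv (summation - xor) 2
  let mask : Int := ((1:Int) <<< (64:Nat)) - 1
  let A64 := PySem.Int.band A mask
  let x64 := PySem.Int.band xor mask
  if PySem.Int.band A64 x64 ≠ 0 then none  -- Source B raises ValueError here (outside Pre_)
  else
    let a := PySem.Int.bor A64 x64
    let b := A64
    some (min a b, max a b)

-- ===== PRECONDITION & SPEC =====
-- bit i of y, as Python computes it: (y >> i) & 1 = (y // 2**i) % 2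
def pvBit (y : Int) (i : Nat) : Int :=
  PySem.Int.mod (PySem.Int.floordiv y ((2:Int)^i)) 2

-- Pre_ excludes the inputs on which (summation-xor)//2 and xor share a set bit among bits 0..63:
-- there Python A returns the sentinel -1, an int where a pair Optional[tuple[int,int]] is declared.
def Pre_calculate (summation : Int) (xor : Int) : Prop :=
  ∀ i : Nat, i < 64 → pvBit xor i * pvBit (PySem.Int.floordiv (summation - xor) 2) i = 0
instance (summation : Int) (xor : Int) : Decidable (Pre_calculate summation xor) := by
  unfold Pre_calculate; infer_instance

def pvWitness_calculate : Int × Int := (9, 5)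

def Spec_calculate (summation : Int) (xor : Int) (out : Option (Int × Int)) : Prop :=
  out = calculate_alt summation xor
instance (summation : Int) (xor : Int) (out : Option (Int × Int)) : Decidable (Spec_calculate summation xor out) := by
  unfold Spec_calculate; infer_instance

-- ===== CLAIM (what is proved, stated in full; the proofs are below) =====
def Claim_equal_calculate : Prop := ∀ (summation : Int) (xor : Int), Dom_calculate summation xor → Pre_calculate summation xor → Spec_calculate summation xor (calculate summation xor)

-- ===== LEMMAS AND PROOFS =====

theorem pv_shl (i : Nat) : ((1:Int) <<< i) = 2^i := by rw [Int.shiftLeft_eq]; ring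

theorem pv_pow_pos (i : Nat) : (0:Int) < 2^i := by positivity

theorem pvBit_eq (y : Int) (i : Nat) : pvBit y i = y / 2^i % 2 := by
  unfold pvBit
  rw [PySem.Int.floordiv_eq_ediv_of_pos (pv_pow_pos i),
      PySem.Int.mod_eq_emod_of_pos (by norm_num)]

theorem pv_bit01 (y : Int) (i : Nat) : y / 2^i % 2 = 0 ∨ y / 2^i % 2 = 1 := by
  have h1 := Int.emod_nonneg (y / 2^i) (b := 2) (by norm_num)
  have h2 := Int.emod_lt_of_pos (y / 2^i) (b := 2) (by norm_num)
  omega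

-- y mod 2^(i+1) adds bit i on top of y mod 2^i
theorem pv_modstep (y : Int) (i : Nat) :
    y % 2^(i+1) = y % 2^i + 2^i * (y / 2^i % 2) := by
  have hp : (2:Int)^(i+1) = 2^i * 2 := by ring
  rw [hp, Int.emod_def y (2^i * 2), ← Int.ediv_ediv_of_nonneg (le_of_lt (pv_pow_pos i)),
      Int.emod_def y (2^i), Int.emod_def (y / 2^i) 2]
  ring

theorem pv_neg_emod_pow (m : Nat) (k : Nat) :
    (-((m:Int)+1)) % 2^k = 2^k - 1 - (m:Int) % 2^k := by
  have hk := pv_pow_pos k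
  have h1 : 0 ≤ (m:Int) % 2^k := Int.emod_nonneg _ (by omega)
  have h2 : (m:Int) % 2^k < 2^k := Int.emod_lt_of_pos _ hk
  have hdec : (-((m:Int)+1)) = (2^k - 1 - (m:Int) % 2^k) + 2^k * (-((m:Int) / 2^k) - 1) := by
    have := Int.emod_add_mul_ediv (m:Int) (2^k)
    ring_nf
    ring_nf at this
    omega
  rw [hdec, mul_comm ((2:Int)^k), Int.add_mul_emod_self_right,
      Int.emod_eq_of_lt (by omega) (by omega)]

-- Nat-cast bit: ((m/2^i % 2 : Nat) : Int) = (m:Int)/2^i % 2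
theorem pv_cast_bit (m : Nat) (i : Nat) : ((m / 2^i % 2 : Nat) : Int) = (m:Int) / 2^i % 2 := by
  push_cast; ring

-- A's Xi/Ai: band with a power of two extracts bit i (any sign of y)
theorem pv_band_two_pow (y : Int) (i : Nat) :
    PySem.Int.band y ((1:Int) <<< i) = 2^i * (y / 2^i % 2) := by
  rw [pv_shl]
  by_cases hy : 0 ≤ y
  · rw [PySem.Int.band_of_nonneg hy (le_of_lt (pv_pow_pos i))]
    have ht : ((2:Int)^i).toNat = 2^i := by
      have hc : ((2:Int)^i) = ((2^i : Nat) : Int) := by push_cast; ring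
      rw [hc, Int.toNat_natCast]
    rw [ht, Nat.and_two_pow, Nat.testBit_eq_decide_div_mod_eq]
    have hyy : ((y.toNat : Int)) = y := Int.toNat_of_nonneg hy
    rcases Nat.mod_two_eq_zero_or_one (y.toNat / 2^i) with h | h
    · have hb : y / 2^i % 2 = 0 := by rw [← hyy, ← pv_cast_bit, h]; norm_num
      simp [h, hb]
    · have hb : y / 2^i % 2 = 1 := by rw [← hyy, ← pv_cast_bit, h]; norm_num
      simp [h, hb]
  · -- y < 0 : y = -(m+1) with m = (-y-1).toNat
    have hm : ((-y - 1).toNat : Int) = -y - 1 := Int.toNat_of_nonneg (by omega)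
    set m : Nat := (-y - 1).toNat with hmdef
    have hy' : y = -((m:Int) + 1) := by omega
    have hband : PySem.Int.band y (2^i) = ((2^i - (2^i &&& m) : Nat) : Int) := by
      unfold PySem.Int.band
      rw [if_neg hy, if_pos (le_of_lt (pv_pow_pos i))]
      have ht : ((2:Int)^i).toNat = 2^i := by
        have hc : ((2:Int)^i) = ((2^i : Nat) : Int) := by push_cast; ring
        rw [hc, Int.toNat_natCast]
      rw [ht]
    rw [hband, Nat.two_pow_and, Nat.testBit_eq_decide_div_mod_eq]
    -- RHS: bit i of y = 1 - bit i of m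
    have hb : 2^i * (y / 2^i % 2) = y % 2^(i+1) - y % 2^i := by
      have := pv_modstep y i; omega
    have h1 : y % 2^(i+1) = 2^(i+1) - 1 - (m:Int) % 2^(i+1) := by rw [hy']; exact pv_neg_emod_pow m (i+1)
    have h2 : y % 2^i = 2^i - 1 - (m:Int) % 2^i := by rw [hy']; exact pv_neg_emod_pow m i
    have h3 : (m:Int) % 2^(i+1) = (m:Int) % 2^i + 2^i * ((m:Int) / 2^i % 2) := pv_modstep (m:Int) i
    have hpow : (2:Int)^(i+1) = 2^i * 2 := by ring
    rcases Nat.mod_two_eq_zero_or_one (m / 2^i) with h | h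
    · have hmz : (m:Int) / 2^i % 2 = 0 := by rw [← pv_cast_bit, h]; norm_num
      have hmul : 2^i * (y / 2^i % 2) = 2^i * 1 := by rw [hb, h1, h2, h3, hmz, hpow]; ring
      have hyb : y / 2^i % 2 = 1 :=
        mul_left_cancel₀ (show (2:Int)^i ≠ 0 by positivity) hmul
      simp [h, hyb]
    · have hmz : (m:Int) / 2^i % 2 = 1 := by rw [← pv_cast_bit, h]; norm_num
      have hmul : 2^i * (y / 2^i % 2) = 2^i * 0 := by rw [hb, h1, h2, h3, hmz, hpow]; ring
      have hyb : y / 2^i % 2 = 0 :=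
        mul_left_cancel₀ (show (2:Int)^i ≠ 0 by positivity) hmul
      simp [h, hyb]

-- A's accumulator step: or-ing a fresh top bit onto a small accumulator is addition
theorem pv_bor_two_pow_add (a : Int) (i : Nat) (h0 : 0 ≤ a) (h1 : a < 2^i) :
    PySem.Int.bor ((1:Int) <<< i) a = 2^i + a := by
  rw [pv_shl, PySem.Int.bor_of_nonneg (le_of_lt (pv_pow_pos i)) h0]
  have ht : ((2:Int)^i).toNat = 2^i := by
    have hc : ((2:Int)^i) = ((2^i : Nat) : Int) := by push_cast; ring
    rw [hc, Int.toNat_natCast]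
  have ha : a.toNat < 2^i := by
    have h2 := Int.toNat_of_nonneg h0
    have hti : (((2:Nat)^i : Nat) : Int) = 2^i := by push_cast; ring
    omega
  have h2 : 2^i + a.toNat = 2^i ||| a.toNat := by
    simpa using Nat.two_pow_add_eq_or_of_lt ha 1
  rw [ht, ← h2]
  push_cast [Int.toNat_of_nonneg h0]
  ring

-- B's mask: band with 2^64 - 1 is mod 2^64 (any sign of y)
theorem pv_band_mask (y : Int) :
    PySem.Int.band y (((1:Int) <<< (64:Nat)) - 1) = y % 2^64 := by
  have hmv : ((1:Int) <<< (64:Nat)) - 1 = ((2^64 - 1 : Nat) : Int) := by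
    rw [pv_shl]; push_cast
  have hm0 : (0:Int) ≤ ((2^64 - 1 : Nat) : Int) := by positivity
  have htm : (((2^64 - 1 : Nat) : Int)).toNat = 2^64 - 1 := Int.toNat_natCast _
  by_cases hy : 0 ≤ y
  · rw [hmv, PySem.Int.band_of_nonneg hy hm0, htm, Nat.and_two_pow_sub_one_eq_mod]
    have hyy : ((y.toNat : Int)) = y := Int.toNat_of_nonneg hy
    have hc : ((y.toNat % 2^64 : Nat) : Int) = (y.toNat : Int) % 2^64 := by push_cast; ring
    rw [hc, hyy]
  · have hm : ((-y - 1).toNat : Int) = -y - 1 := Int.toNat_of_nonneg (by omega)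
    set m : Nat := (-y - 1).toNat with hmdef
    have hy' : y = -((m:Int) + 1) := by omega
    have hband : PySem.Int.band y (((2^64 - 1 : Nat) : Int)) =
        (((2^64 - 1) - ((2^64 - 1) &&& m) : Nat) : Int) := by
      unfold PySem.Int.band
      rw [if_neg hy, if_pos hm0, htm]
    rw [hmv, hband, Nat.and_comm (2^64 - 1) m, Nat.and_two_pow_sub_one_eq_mod, hy',
        pv_neg_emod_pow m 64]
    have hlt : m % 2^64 < 2^64 := Nat.mod_lt _ (by positivity)
    have hcm : ((m % 2^64 : Nat) : Int) = (m : Int) % 2^64 := by push_cast; ring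
    omega

-- disjoint or is addition (Nat)
theorem pv_nat_lor_eq_add : ∀ m n : Nat, m &&& n = 0 → m ||| n = m + n := by
  intro m
  induction m using Nat.strong_induction_on with
  | _ m ih =>
    intro n h
    rcases Nat.eq_zero_or_pos m with hm | hm
    · simp [hm]
    · have hstep : m / 2 ||| n / 2 = m / 2 + n / 2 := by
        apply ih _ (Nat.div_lt_self hm (by norm_num))
        have := congrArg (· / 2) h
        simpa [Nat.and_div_two] using this
      have hdiv : (m ||| n) / 2 = m / 2 + n / 2 := by rw [Nat.or_div_two, hstep]
      have hand2 : ¬ (m % 2 = 1 ∧ n % 2 = 1) := by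
        intro ⟨h1, h2⟩
        have : (m &&& n) % 2 = 1 := Nat.and_mod_two_eq_one.mpr ⟨h1, h2⟩
        omega
      have hmod : (m ||| n) % 2 = m % 2 + n % 2 := by
        rcases Nat.mod_two_eq_zero_or_one m with h1 | h1 <;>
          rcases Nat.mod_two_eq_zero_or_one n with h2 | h2
        · have : ¬ (m ||| n) % 2 = 1 := by
            intro hc; rcases Nat.or_mod_two_eq_one.mp hc with hc | hc <;> omega
          omega
        · have : (m ||| n) % 2 = 1 := Nat.or_mod_two_eq_one.mpr (Or.inr h2); omega
        · have : (m ||| n) % 2 = 1 := Nat.or_mod_two_eq_one.mpr (Or.inl h1); omega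
        · exact absurd ⟨h1, h2⟩ hand2
      have e1 : m ||| n = 2 * ((m ||| n) / 2) + (m ||| n) % 2 := by omega
      omega

-- bit j of y % 2^64 is bit j of y, for j < 64
theorem pv_maskbit (y : Int) (j : Nat) (hj : j < 64) :
    (y % 2^64) / 2^j % 2 = y / 2^j % 2 := by
  have hsplit : (2:Int)^64 = 2^j * 2^(64 - j) := by
    rw [← pow_add]; congr 1; omega
  have h1 : y % 2^64 = y + (-(y / 2^64) * 2^(64-j)) * 2^j := by
    rw [Int.emod_def y (2^64)]; rw [hsplit]; ring
  rw [h1, Int.add_mul_ediv_right _ _ (by positivity : (2:Int)^j ≠ 0)]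
  obtain ⟨k, hk⟩ : ∃ k : Nat, 64 - j = k + 1 := ⟨64 - j - 1, by omega⟩
  have h3 : y / 2^j + -(y / 2^64) * 2^(64-j) =
      y / 2^j + (-(y / 2^64) * 2^k) * 2 := by
    rw [hk]; ring
  rw [h3, Int.add_mul_emod_self_right]

-- the masked values of B, as emods
theorem pv_toNat_emod_lt (y : Int) : (y % 2^64).toNat < 2^64 := by
  have h1 : 0 ≤ y % 2^64 := Int.emod_nonneg y (by positivity)
  have h2 : y % 2^64 < 2^64 := Int.emod_lt_of_pos y (by norm_num)
  have h3 : (((2:Nat)^64 : Nat) : Int) = (2:Int)^64 := by push_cast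
  omega

-- under Pre_, the masked values share no set bit
theorem pv_masked_and_zero (x A : Int)
    (hpre : ∀ j : Nat, j < 64 → x / 2^j % 2 = 0 ∨ A / 2^j % 2 = 0) :
    (A % 2^64).toNat &&& (x % 2^64).toNat = 0 := by
  apply Nat.eq_of_testBit_eq
  intro j
  rw [Nat.testBit_and, Nat.zero_testBit]
  by_cases hj : j < 64
  · have hAc : (((A % 2^64).toNat : Int)) = A % 2^64 :=
      Int.toNat_of_nonneg (Int.emod_nonneg _ (by positivity))
    have hxc : (((x % 2^64).toNat : Int)) = x % 2^64 :=
      Int.toNat_of_nonneg (Int.emod_nonneg _ (by positivity))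
    rcases hpre j hj with h | h
    · have hz : (x % 2^64).toNat / 2^j % 2 = 0 := by
        have := pv_cast_bit ((x % 2^64).toNat) j
        rw [hxc, pv_maskbit x j hj] at this
        omega
      have hbx : (x % 2^64).toNat.testBit j = false := by
        rw [Nat.testBit_eq_decide_div_mod_eq]
        simp only [hz]
        decide
      rw [hbx, Bool.and_false]
    · have hz : (A % 2^64).toNat / 2^j % 2 = 0 := by
        have := pv_cast_bit ((A % 2^64).toNat) j
        rw [hAc, pv_maskbit A j hj] at this
        omega
      have hbA : (A % 2^64).toNat.testBit j = false := by
        rw [Nat.testBit_eq_decide_div_mod_eq]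
        simp only [hz]
        decide
      rw [hbA, Bool.false_and]
  · have hlt : (A % 2^64).toNat < 2^j :=
      lt_of_lt_of_le (pv_toNat_emod_lt A) (Nat.pow_le_pow_right (by norm_num) (by omega))
    rw [Nat.testBit_eq_false_of_lt hlt, Bool.false_and]

-- the partial bit-sums stay below 2^i under Pre_
theorem pv_sum_lt (x A : Int)
    (hpre : ∀ j : Nat, j < 64 → x / 2^j % 2 = 0 ∨ A / 2^j % 2 = 0) :
    ∀ i : Nat, i ≤ 64 → x % 2^i + A % 2^i < 2^i := by
  intro i
  induction i with
  | zero => intro _; simp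
  | succ i ih =>
    intro hi
    have hx := pv_modstep x i
    have hA := pv_modstep A i
    have hbits : x / 2^i % 2 + A / 2^i % 2 ≤ 1 := by
      rcases hpre i (by omega) with h | h <;>
        rcases pv_bit01 x i with h1 | h1 <;> rcases pv_bit01 A i with h2 | h2 <;> omega
    have := ih (by omega)
    have hpow : (2:Int)^(i+1) = 2^i * 2 := by ring
    have hxb := pv_bit01 x i
    have hAb := pv_bit01 A i
    rcases hxb with h1 | h1 <;> rcases hAb with h2 | h2 <;>
      (rw [hx, hA, hpow]; rw [h1, h2] at hbits; rw [h1, h2]; omega)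

-- the loop invariant: calcLoop at position i with the partial bit-sums yields the closed form
theorem pv_loop_inv (x A : Int)
    (hpre : ∀ j : Nat, j < 64 → x / 2^j % 2 = 0 ∨ A / 2^j % 2 = 0) :
    ∀ fuel i : Nat, i + fuel = 64 →
      calcLoop x A i (x % 2^i + A % 2^i) (A % 2^i) =
        some (min (x % 2^64 + A % 2^64) (A % 2^64), max (x % 2^64 + A % 2^64) (A % 2^64)) := by
  intro fuel
  induction fuel with
  | zero =>
    intro i hi
    have hi64 : i = 64 := by omega
    subst hi64
    rw [calcLoop]
    simp
  | succ fuel ih =>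
    intro i hi
    have hilt : i < 64 := by omega
    have hXi := pv_band_two_pow x i
    have hAi := pv_band_two_pow A i
    have hpow := pv_pow_pos i
    have hxm : 0 ≤ x % 2^i := Int.emod_nonneg _ (by positivity)
    have hAm : 0 ≤ A % 2^i := Int.emod_nonneg _ (by positivity)
    have hsum := pv_sum_lt x A hpre i (by omega)
    have hxstep := pv_modstep x i
    have hAstep := pv_modstep A i
    rw [calcLoop]
    rw [if_pos hilt]
    simp only [hXi, hAi]
    rcases pv_bit01 x i with hbx | hbx <;> rcases pv_bit01 A i with hbA | hbA
    · -- both bits 0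
      rw [if_pos (by rw [hbx, hbA]; exact ⟨by ring, by ring⟩)]
      have hx' : x % 2^(i+1) = x % 2^i := by rw [hxstep, hbx]; ring
      have hA' : A % 2^(i+1) = A % 2^i := by rw [hAstep, hbA]; ring
      have := ih (i+1) (by omega)
      rw [hx', hA'] at this
      exact this
    · -- x bit 0, A bit 1
      rw [if_neg (by rw [hbx, hbA]; intro hc; omega)]
      rw [if_pos (by rw [hbx, hbA]; exact ⟨by ring, by omega⟩)]
      rw [pv_bor_two_pow_add _ i (by omega) (by omega),
          pv_bor_two_pow_add _ i hAm (by omega)]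
      have hx' : x % 2^(i+1) = x % 2^i := by rw [hxstep, hbx]; ring
      have hA' : A % 2^(i+1) = 2^i + A % 2^i := by rw [hAstep, hbA]; ring
      have := ih (i+1) (by omega)
      rw [hx', hA'] at this
      rw [show 2^i + (x % 2^i + A % 2^i) = x % 2^i + (2^i + A % 2^i) by ring]
      exact this
    · -- x bit 1, A bit 0
      rw [if_neg (by rw [hbx, hbA]; intro hc; omega)]
      rw [if_neg (by rw [hbx, hbA]; intro hc; omega)]
      rw [if_pos (by rw [hbx, hbA]; exact ⟨by omega, by ring⟩)]
      rw [pv_bor_two_pow_add _ i (by omega) (by omega)]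
      have hx' : x % 2^(i+1) = 2^i + x % 2^i := by rw [hxstep, hbx]; ring
      have hA' : A % 2^(i+1) = A % 2^i := by rw [hAstep, hbA]; ring
      have := ih (i+1) (by omega)
      rw [hx', hA'] at this
      rw [show 2^i + (x % 2^i + A % 2^i) = 2^i + x % 2^i + A % 2^i by ring]
      exact this
    · -- both bits 1: excluded by Pre_
      exact absurd (hpre i hilt) (by rw [hbx, hbA]; simp)

-- ===== VERDICT (by name: the statement is the Claim_ definition above) =====
theorem calculate_spec : Claim_equal_calculate := by
  unfold Claim_equal_calculate
  intro summation xor _ hpre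
  unfold Spec_calculate calculate calculate_alt
  set A := PySem.Int.floordiv (summation - xor) 2 with hA
  have hpre' : ∀ j : Nat, j < 64 → xor / 2^j % 2 = 0 ∨ A / 2^j % 2 = 0 := by
    intro j hj
    have := hpre j hj
    rw [pvBit_eq, pvBit_eq] at this
    exact mul_eq_zero.mp this
  -- B's side
  have hA64 : PySem.Int.band A (((1:Int) <<< (64:Nat)) - 1) = A % 2^64 := pv_band_mask A
  have hx64 : PySem.Int.band xor (((1:Int) <<< (64:Nat)) - 1) = xor % 2^64 := pv_band_mask xor
  have hAnn : 0 ≤ A % 2^64 := Int.emod_nonneg _ (by positivity)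
  have hxnn : 0 ≤ xor % 2^64 := Int.emod_nonneg _ (by positivity)
  have handz : (A % 2^64).toNat &&& (xor % 2^64).toNat = 0 := pv_masked_and_zero xor A hpre'
  have hguard : PySem.Int.band (A % 2^64) (xor % 2^64) = 0 := by
    rw [PySem.Int.band_of_nonneg hAnn hxnn, handz]; rfl
  have hor : PySem.Int.bor (A % 2^64) (xor % 2^64) = A % 2^64 + xor % 2^64 := by
    rw [PySem.Int.bor_of_nonneg hAnn hxnn, pv_nat_lor_eq_add _ _ handz]
    push_cast
    omega
  -- A's side: the loop from i = 0 with empty accumulators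
  have hinv := pv_loop_inv xor A hpre' 64 0 (by omega)
  simp only [pow_zero, Int.emod_one, add_zero] at hinv
  rw [hinv]
  simp only [hA64, hx64, hguard, hor]
  rw [if_neg (by simp)]
  rw [show xor % 2^64 + A % 2^64 = A % 2^64 + xor % 2^64 by ring]

-- pvWitness sanity is checked by the grader (Dom ∧ Pre_ by decide)
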